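-- pv_equiv track=rewrite | github.com/denisliv/OCR | markdown_postproc.py | fix_ocr_markdown
-- ===== SOURCE A (Python) =====
-- def fix_ocr_markdown(md: str) -> str:
--     lines = md.splitlines()
--     cleaned = []
--     for line in lines:
--         stripped = line.strip()
--         if stripped.startswith("|") and stripped.endswith("|"):
--             cells = [cell.strip() for cell in stripped[1:-1].split("|")]
--             if all(cell == "" for cell in cells):
--                 continue
--         cleaned.append(line)
--     while cleaned and cleaned[-1].strip() == "":
--         cleaned.pop()
--     return "\n".join(cleaned)
-- ===== SOURCE B (Python) =====
-- def fix_ocr_markdown(md: str) -> str: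
--     # Single forward pass: blanks are buffered and only emitted before later
--     # content, so trailing blanks are discarded without a second trimming pass.
--     out = []
--     pending = []
--     for line in md.splitlines():
--         stripped = line.strip()
--         if stripped.startswith("|") and stripped.endswith("|"):
--             cells = [cell.strip() for cell in stripped[1:-1].split("|")]
--             if all(cell == "" for cell in cells):
--                 continue
--         if stripped == "":
--             pending.append(line)
--         else:
--             out.extend(pending)
--             pending = []
--             out.append(line)
--     return "\n".join(out)
-- ===== Notes on version B (the rewrite author's own statement) =====
-- stated objective: alternative
-- what changed: Replaces A's build-everything-then-while-pop trailing-blank trim with a single forward pass that buffers blank lines and flushes them only before later content, so trailing blanks are never emitted.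
import Mathlib
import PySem

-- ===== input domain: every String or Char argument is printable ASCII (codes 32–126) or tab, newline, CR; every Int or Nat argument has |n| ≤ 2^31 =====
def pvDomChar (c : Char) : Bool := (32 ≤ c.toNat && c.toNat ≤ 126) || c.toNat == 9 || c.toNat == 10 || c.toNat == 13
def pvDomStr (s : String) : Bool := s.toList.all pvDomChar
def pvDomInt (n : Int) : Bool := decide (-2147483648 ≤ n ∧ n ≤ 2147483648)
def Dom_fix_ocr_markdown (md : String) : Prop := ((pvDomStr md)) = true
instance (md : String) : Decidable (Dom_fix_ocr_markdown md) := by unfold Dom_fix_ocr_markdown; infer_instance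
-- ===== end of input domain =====

-- B differs from A by one decomposition change: instead of building the whole list and
-- then while-popping trailing blank lines, B buffers blank lines and flushes them only
-- before later content in a single forward pass (objective: alternative).

-- ===== PORT A =====
-- the empty-table-row test shared verbatim by both Pythons:
-- stripped starts and ends with "|" and every cell of stripped[1:-1].split("|") strips to ""
def pvIsEmptyRow (line : String) : Bool :=
  let stripped := PySem.Str.strip line
  PySem.Str.startswith stripped "|" && PySem.Str.endswith stripped "|" &&
    (((PySem.Str.split? (PySem.Str.slice stripped (some 1) (some (-1))) "|").getD []).map
        PySem.Str.strip).all (fun cell => cell == "")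

-- the 'while cleaned and cleaned[-1].strip() == "": cleaned.pop()' loop of A
def pvPopTrailing (xs : List String) : List String :=
  if h : xs ≠ [] then
    if PySem.Str.strip (xs.getLast h) == "" then pvPopTrailing xs.dropLast else xs
  else xs
termination_by xs.length
decreasing_by
  cases xs with
  | nil => simp at h
  | cons a t => simp

def fix_ocr_markdown (md : String) : String :=
  let lines := PySem.Str.splitlines md
  let cleaned := lines.foldl
    (fun cleaned line => if pvIsEmptyRow line then cleaned else cleaned ++ [line]) []
  PySem.Str.join "\n" (pvPopTrailing cleaned)

-- ===== PORT B =====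
def pvStepB (st : List String × List String) (line : String) : List String × List String :=
  if pvIsEmptyRow line then st
  else if PySem.Str.strip line == "" then (st.1, st.2 ++ [line])
  else (st.1 ++ st.2 ++ [line], [])

def fix_ocr_markdown_alt (md : String) : String :=
  let st := (PySem.Str.splitlines md).foldl pvStepB ([], [])
  PySem.Str.join "\n" st.1

-- ===== PRECONDITION & SPEC =====
def Spec_fix_ocr_markdown (md : String) (out : String) : Prop := out = fix_ocr_markdown_alt md
instance (md : String) (out : String) : Decidable (Spec_fix_ocr_markdown md out) := by unfold Spec_fix_ocr_markdown; infer_instance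

-- ===== CLAIM (what is proved, stated in full; the proofs are below) =====
def Claim_equal_fix_ocr_markdown : Prop := ∀ (md : String), Dom_fix_ocr_markdown md → Spec_fix_ocr_markdown md (fix_ocr_markdown md)

-- ===== LEMMAS AND PROOFS =====

-- blank-line test
def pvBlank (s : String) : Bool := PySem.Str.strip s == ""

-- reference trimming: drop trailing elements satisfying pvBlank
def pvRT (xs : List String) : List String := (xs.reverse.dropWhile pvBlank).reverse

theorem pvPopTrailing_eq_pvRT (xs : List String) : pvPopTrailing xs = pvRT xs := by
  induction xs using pvPopTrailing.induct with
  | case1 xs hne hblank ih =>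
      rw [pvPopTrailing, dif_pos hne, if_pos hblank, ih]
      have hx : xs.dropLast ++ [xs.getLast hne] = xs := List.dropLast_append_getLast hne
      unfold pvRT
      conv_rhs => rw [← hx]
      rw [List.reverse_append, List.reverse_singleton, List.singleton_append,
        List.dropWhile_cons_of_pos (by simpa [pvBlank] using hblank)]
  | case2 xs hne hblank =>
      rw [pvPopTrailing, dif_pos hne, if_neg hblank]
      have hx : xs.dropLast ++ [xs.getLast hne] = xs := List.dropLast_append_getLast hne
      unfold pvRT
      conv_rhs => rw [← hx]
      rw [List.reverse_append, List.reverse_singleton, List.singleton_append,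
        List.dropWhile_cons_of_neg (by simpa [pvBlank] using hblank),
        List.reverse_cons, List.reverse_reverse]
      exact hx.symm
  | case3 xs hne => rw [pvPopTrailing, dif_neg hne]; simp at hne; simp [hne, pvRT]

theorem dropWhile_append_cons_of_neg {α : Type} (p : α → Bool) (u v : List α) (a : α)
    (ha : ¬ p a = true) :
    List.dropWhile p (u ++ a :: v) = List.dropWhile p u ++ a :: v := by
  induction u with
  | nil => simp [List.dropWhile_cons_of_neg ha]
  | cons x u ih =>
      by_cases hx : p x = true
      · simpa [List.dropWhile_cons_of_pos hx] using ih
      · simp [List.dropWhile_cons_of_neg hx]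

theorem pvRT_append_nonblank (u r : List String) (a : String) (ha : ¬ pvBlank a = true) :
    pvRT (u ++ a :: r) = u ++ a :: pvRT r := by
  unfold pvRT
  rw [show u ++ a :: r = (u ++ [a]) ++ r by simp, List.reverse_append,
    show (u ++ [a]).reverse = a :: u.reverse by simp,
    show r.reverse ++ a :: u.reverse = r.reverse ++ a :: u.reverse from rfl,
    dropWhile_append_cons_of_neg pvBlank r.reverse u.reverse a ha]
  simp

theorem pvRT_all_blank (u : List String) (hu : ∀ x ∈ u, pvBlank x = true) : pvRT u = [] := by
  unfold pvRT
  rw [List.dropWhile_eq_nil_iff.mpr (by intro x hx; exact hu x (List.mem_reverse.mp hx))]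
  rfl

theorem foldB_invariant (l : List String) (out pending : List String)
    (hp : ∀ x ∈ pending, pvBlank x = true) :
    (l.foldl pvStepB (out, pending)).1
      = out ++ pvRT (pending ++ l.filter (fun x => !pvIsEmptyRow x)) := by
  induction l generalizing out pending with
  | nil => simp [pvRT_all_blank pending hp]
  | cons a l ih =>
      by_cases hrow : pvIsEmptyRow a = true
      · rw [List.foldl_cons, show pvStepB (out, pending) a = (out, pending) by
          simp [pvStepB, hrow], ih out pending hp]
        simp [hrow]
      · by_cases hb : pvBlank a = true
        · rw [List.foldl_cons, show pvStepB (out, pending) a = (out, pending ++ [a]) by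
            simp [pvStepB, hrow]; simpa [pvBlank] using hb,
            ih out (pending ++ [a]) (by intro x hx; rcases List.mem_append.mp hx with h | h
                                        · exact hp x h
                                        · simp at h; simpa [h] using hb)]
          simp [hrow]
        · have hstep : pvStepB (out, pending) a = (out ++ pending ++ [a], []) := by
            have hb' : ¬ (PySem.Str.strip a == "") = true := by simpa [pvBlank] using hb
            simp [pvStepB, hrow, hb']
          rw [List.foldl_cons, hstep,
            ih (out ++ pending ++ [a]) [] (by intro x hx; simp at hx),
            List.filter_cons, if_pos (by simp [hrow]),
            pvRT_append_nonblank pending _ a hb]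
          simp

-- ===== VERDICT (by name: the statement is the Claim_ definition above) =====
theorem fix_ocr_markdown_spec : Claim_equal_fix_ocr_markdown := by
  intro md _
  show PySem.Str.join "\n"
      (pvPopTrailing ((PySem.Str.splitlines md).foldl
        (fun cleaned line => if pvIsEmptyRow line then cleaned else cleaned ++ [line]) []))
    = PySem.Str.join "\n" ((PySem.Str.splitlines md).foldl pvStepB ([], [])).1
  have hfun : (fun (cleaned : List String) line =>
        if pvIsEmptyRow line then cleaned else cleaned ++ [line])
      = (fun acc x => if (!pvIsEmptyRow x) = true then acc ++ [x] else acc) := by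
    funext acc x
    by_cases h : pvIsEmptyRow x = true <;> simp [h]
  rw [hfun, PySem.List.foldl_append_if_eq_filter, List.nil_append,
    pvPopTrailing_eq_pvRT, foldB_invariant _ [] [] (by intro x hx; simp at hx),
    List.nil_append, List.nil_append]
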